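-- pv_equiv track=rewrite | github.com/theabbie/leetcode | miscellaneous/Tear_It_Apart.py | count
-- ===== SOURCE A (Python) =====
-- def count(val):
--     res = 0
--     while val > 2:
--         res += 1
--         val = val // 2
--     if val == 2:
--         res += 2
--     if val == 1:
--         res += 1
--     return res
-- ===== SOURCE B (Python) =====
-- def count(val):
--     # closed form: steps-to-<=2 plus adjustment is exactly the bit length of val
--     return val.bit_length() if val > 0 else 0
-- ===== Notes on version B (the rewrite author's own statement) =====
-- stated objective: faster
-- what changed: Replaced the halving loop plus final adjustments by the closed form bit_length(val) for positive val (0 otherwise).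
import Mathlib
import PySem

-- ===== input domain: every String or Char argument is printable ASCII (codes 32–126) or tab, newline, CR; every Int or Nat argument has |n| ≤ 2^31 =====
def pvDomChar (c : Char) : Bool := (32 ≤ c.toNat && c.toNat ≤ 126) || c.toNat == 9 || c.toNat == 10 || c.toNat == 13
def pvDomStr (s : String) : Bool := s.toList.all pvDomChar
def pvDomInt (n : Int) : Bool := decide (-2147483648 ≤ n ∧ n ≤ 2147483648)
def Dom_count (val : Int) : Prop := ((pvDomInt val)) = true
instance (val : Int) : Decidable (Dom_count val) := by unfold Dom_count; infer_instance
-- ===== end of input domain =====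

-- B replaces A's halving loop by the closed form bit_length(val) for val > 0 (0 otherwise): faster, loop-free.

-- ===== PORT A =====
-- the 'while val > 2' loop, carrying the state (val, res)
def countLoop (val res : Int) : Int × Int :=
  if val > 2 then countLoop (PySem.Int.floordiv val 2) (res + 1) else (val, res)
termination_by val.toNat
decreasing_by
  have := PySem.Int.floordiv_eq_ediv_of_pos (a := val) (b := 2) (by omega)
  rw [this]; omega

def count (val : Int) : Int :=
  let p := countLoop val 0
  let res1 := if p.1 = 2 then p.2 + 2 else p.2
  if p.1 = 1 then res1 + 1 else res1

-- ===== PORT B =====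
def count_alt (val : Int) : Int :=
  if val > 0 then (PySem.Int.bitLength val : Int) else 0

-- ===== PRECONDITION & SPEC =====
def Spec_count (val : Int) (out : Int) : Prop := out = count_alt val
instance (val : Int) (out : Int) : Decidable (Spec_count val out) := by unfold Spec_count; infer_instance

-- ===== CLAIM (what is proved, stated in full; the proofs are below) =====
def Claim_equal_count : Prop := ∀ (val : Int), Dom_count val → Spec_count val (count val)

-- ===== LEMMAS AND PROOFS =====

theorem countLoop_eq (val res : Int) :
    countLoop val res = if val > 2 then countLoop (PySem.Int.floordiv val 2) (res + 1) else (val, res) := by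
  rw [countLoop]

theorem floordiv2_lt (val : Int) (h : val > 2) :
    0 < PySem.Int.floordiv val 2 ∧ PySem.Int.floordiv val 2 < val := by
  have := PySem.Int.floordiv_eq_ediv_of_pos (a := val) (b := 2) (by omega)
  rw [this]; omega

-- the loop accumulator only shifts the second component of the result
theorem countLoop_shift : ∀ (n : Nat) (val res : Int), val ≤ (n : Int) →
    countLoop val res = ((countLoop val 0).1, res + (countLoop val 0).2) := by
  intro n
  induction n with
  | zero =>
    intro val res _
    rw [countLoop_eq, if_neg (by omega : ¬ val > 2)]
    conv_rhs => rw [countLoop_eq]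
    rw [if_neg (by omega : ¬ val > 2)]
    simp
  | succ n ih =>
    intro val res hle
    by_cases h : val > 2
    · obtain ⟨hp, hlt⟩ := floordiv2_lt val h
      have hfd : PySem.Int.floordiv val 2 ≤ (n : Int) := by omega
      conv_lhs => rw [countLoop_eq, if_pos h]
      conv_rhs => rw [countLoop_eq, if_pos h]
      rw [ih _ (res + 1) hfd, ih _ (0 + 1) hfd]
      simp; ring
    · rw [countLoop_eq, if_neg h]
      conv_rhs => rw [countLoop_eq]
      rw [if_neg h]; simp

theorem count_rec (val : Int) (h : val > 2) :
    count val = count (PySem.Int.floordiv val 2) + 1 := by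
  obtain ⟨hp, hlt⟩ := floordiv2_lt val h
  have hn : PySem.Int.floordiv val 2 ≤ ((PySem.Int.floordiv val 2).toNat : Int) := by omega
  unfold count
  conv_lhs => rw [countLoop_eq, if_pos h]
  rw [countLoop_shift (PySem.Int.floordiv val 2).toNat _ (0 + 1) hn]
  simp only
  split_ifs <;> omega

theorem count_eq_alt : ∀ (n : Nat) (val : Int), val ≤ (n : Int) → count val = count_alt val := by
  intro n
  induction n with
  | zero =>
    intro val hle
    unfold count count_alt
    rw [countLoop_eq, if_neg (by omega : ¬ val > 2)]
    simp only
    rw [if_neg (by omega : ¬ val = 2), if_neg (by omega : ¬ val = 1), if_neg (by omega : ¬ val > 0)]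
  | succ n ih =>
    intro val hle
    by_cases h : val > 2
    · obtain ⟨hp, hlt⟩ := floordiv2_lt val h
      rw [count_rec val h, ih _ (by omega)]
      unfold count_alt
      rw [if_pos (by omega : val > 0), if_pos hp,
        PySem.Int.bitLength_of_pos (by omega : 0 < val)]
      push_cast; ring
    · unfold count count_alt
      rw [countLoop_eq, if_neg h]
      simp only
      by_cases h2 : val = 2
      · subst h2; decide
      · by_cases h1 : val = 1
        · subst h1; decide
        · rw [if_neg h2, if_neg h1, if_neg (by omega : ¬ val > 0)]

-- ===== VERDICT (by name: the statement is the Claim_ definition above) =====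
theorem count_spec : Claim_equal_count := by
  intro val _
  unfold Spec_count
  by_cases h : val ≤ 0
  · exact count_eq_alt 0 val (by omega)
  · exact count_eq_alt val.toNat val (by omega)
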